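-- pv_equiv track=rewrite | github.com/clair5/yolov5 | test.py | check
-- ===== SOURCE A (Python) =====
-- def check(a, b):
--     a.sort()
--     b.sort()
--     c = b
--     for i in range(len(a)):
--         if a[i] in b:
--             c.remove(a[i])
--     return c
-- ===== SOURCE B (Python) =====
-- def check(a, b):
--     a.sort()
--     b.sort()
--     out = []
--     i = j = 0
--     while i < len(a) and j < len(b):
--         if b[j] < a[i]:
--             out.append(b[j])
--             j += 1
--         elif a[i] == b[j]:
--             i += 1
--             j += 1
--         else:
--             i += 1
--     out.extend(b[j:])
--     b[:] = out
--     return b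
-- ===== Notes on version B (the rewrite author's own statement) =====
-- stated objective: faster
-- what changed: Replaces the per-element 'in b' scan plus list.remove (each a linear scan, with quadratic-cost element shifting) by a single linear two-pointer merge over the two sorted lists.
import Mathlib
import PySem

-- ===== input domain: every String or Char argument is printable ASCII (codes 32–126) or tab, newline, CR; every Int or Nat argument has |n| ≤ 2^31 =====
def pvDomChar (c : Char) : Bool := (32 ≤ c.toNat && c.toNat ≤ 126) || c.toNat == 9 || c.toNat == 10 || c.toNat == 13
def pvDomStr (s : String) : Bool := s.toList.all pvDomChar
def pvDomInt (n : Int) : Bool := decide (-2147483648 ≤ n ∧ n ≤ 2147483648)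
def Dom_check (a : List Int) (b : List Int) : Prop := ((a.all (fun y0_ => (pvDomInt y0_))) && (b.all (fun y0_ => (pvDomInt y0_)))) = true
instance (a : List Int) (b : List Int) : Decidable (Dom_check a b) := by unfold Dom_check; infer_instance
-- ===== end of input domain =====

-- B replaces A's per-element membership scan + list.remove with a linear two-pointer
-- merge over the two sorted lists (objective: faster). Both A and B mutate their
-- arguments (a is sorted; b becomes the returned difference); the equivalence proved
-- here is about the RETURN value, which equals the final value of b in both.

-- ===== PORT A =====
def check (a : List Int) (b : List Int) : List Int :=
  let a' := PySem.List.sorted a (fun x => x) false   -- a.sort()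
  let c0 := PySem.List.sorted b (fun x => x) false   -- b.sort(); c = b
  -- for i in range(len(a)): if a[i] in b: c.remove(a[i])   (b IS c)
  a'.foldl (fun c x => if x ∈ c then (PySem.List.remove? c x).getD c else c) c0

-- ===== PORT B =====
-- the while-loop two-pointer merge of Source B, plus out.extend(b[j:])
def pvMerge : List Int → List Int → List Int
  | [], b => b
  | _ :: _, [] => []
  | x :: xs, y :: ys =>
    if y < x then y :: pvMerge (x :: xs) ys
    else if x = y then pvMerge xs ys
    else pvMerge xs (y :: ys)

def check_alt (a : List Int) (b : List Int) : List Int :=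
  pvMerge (PySem.List.sorted a (fun x => x) false) (PySem.List.sorted b (fun x => x) false)

-- ===== PRECONDITION & SPEC =====
def Spec_check (a : List Int) (b : List Int) (out : List Int) : Prop := out = check_alt a b
instance (a : List Int) (b : List Int) (out : List Int) : Decidable (Spec_check a b out) := by unfold Spec_check; infer_instance

-- ===== CLAIM (what is proved, stated in full; the proofs are below) =====
def Claim_equal_check : Prop := ∀ (a : List Int) (b : List Int), Dom_check a b → Spec_check a b (check a b)

-- ===== LEMMAS AND PROOFS =====

-- A's loop body, named for the proofs
def pvStep (c : List Int) (x : Int) : List Int :=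
  if x ∈ c then (PySem.List.remove? c x).getD c else c

theorem pvStep_pairwise (c : List Int) (x : Int) (h : c.Pairwise (· ≤ ·)) :
    (pvStep c x).Pairwise (· ≤ ·) := by
  unfold pvStep
  split
  · next hx =>
    rw [PySem.List.remove?_eq_some_erase _ _ hx, Option.getD_some]
    exact h.sublist (List.erase_sublist)
  · exact h

theorem pvMerge_nil (c : List Int) : pvMerge [] c = c := by cases c <;> simp [pvMerge]

-- one loop iteration of A equals one head-consumption step of the merge
theorem pvMerge_cons (x : Int) (xs c : List Int)
    (hxs : ∀ z ∈ xs, x ≤ z) (hc : c.Pairwise (· ≤ ·)) :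
    pvMerge (x :: xs) c = pvMerge xs (pvStep c x) := by
  induction c with
  | nil =>
    cases xs <;> simp [pvMerge, pvStep, pvMerge_nil]
  | cons y ys ih =>
    have hys : ys.Pairwise (· ≤ ·) := hc.of_cons
    rcases lt_trichotomy y x with hlt | heq | hgt
    · -- y < x : emit y, recurse on ys
      have hxy : x ≠ y := by omega
      have hstep : pvStep (y :: ys) x = y :: pvStep ys x := by
        by_cases hm : x ∈ ys
        · simp only [pvStep]
          rw [if_pos hm, if_pos (by simp [hm] : x ∈ y :: ys),
              PySem.List.remove?_cons_of_ne ys (Ne.symm hxy),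
              PySem.List.remove?_eq_some_erase ys x hm]
          rfl
        · have hn : x ∉ y :: ys := by simp [hxy, hm]
          simp only [pvStep]
          rw [if_neg hm, if_neg hn]
      rw [hstep]
      have hL : pvMerge (x :: xs) (y :: ys) = y :: pvMerge (x :: xs) ys := by
        simp [pvMerge, hlt]
      have hR : pvMerge xs (y :: pvStep ys x) = y :: pvMerge xs (pvStep ys x) := by
        cases xs with
        | nil => simp [pvMerge]
        | cons x' xs' =>
          have : y < x' := lt_of_lt_of_le hlt (hxs x' (by simp))
          simp [pvMerge, this]
      rw [hL, hR, ih hys]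
    · -- y = x : consume both
      subst heq
      have : pvStep (y :: ys) y = ys := by
        simp [pvStep, PySem.List.remove?_cons_self]
      rw [this]
      simp [pvMerge]
    · -- x < y : x not in sorted y :: ys, skip x
      have hnot : x ∉ y :: ys := by
        intro hm
        rcases List.mem_cons.mp hm with h | h
        · omega
        · have := (List.pairwise_cons.mp hc).1 x h
          omega
      have hst : pvStep (y :: ys) x = y :: ys := by simp [pvStep, hnot]
      rw [hst]
      simp only [pvMerge]
      split_ifs with h1 h2
      · omega
      · omega
      · rfl

theorem foldl_step_eq_merge :
    ∀ (a : List Int), a.Pairwise (· ≤ ·) →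
    ∀ (c : List Int), c.Pairwise (· ≤ ·) → a.foldl pvStep c = pvMerge a c := by
  intro a
  induction a with
  | nil => intro _ c _; simp [pvMerge_nil]
  | cons x xs ih =>
    intro ha c hc
    rw [List.foldl_cons, pvMerge_cons x xs c (List.pairwise_cons.mp ha).1 hc]
    exact ih (List.pairwise_cons.mp ha).2 _ (pvStep_pairwise c x hc)

-- ===== VERDICT (by name: the statement is the Claim_ definition above) =====
theorem check_spec : Claim_equal_check := by
  intro a b _
  unfold Spec_check check check_alt
  have ha := PySem.List.sorted_pairwise (xs := a) (key := fun x : Int => x)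
  have hb := PySem.List.sorted_pairwise (xs := b) (key := fun x : Int => x)
  exact foldl_step_eq_merge _ ha _ hb
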